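-- pv_equiv track=rewrite | github.com/kevmoeman/sketchbook | sketchbook.py | swirlout_counterwise
-- ===== SOURCE A (Python) =====
-- def swirlout_counterwise(word):
--     #swirly word if each letter alternates being the farthest letter away
--     swirly = True
--     direction = 1
--     L = word[0]
--     R = word[0]
--     for i in range(1, len(word)):
--         direction = (i+1)%2
--         #starts with going the other way hahalamo
--         cur = word[i]
--         if direction == 1:
--             if cur < R:
--                 swirly = False
--             R = cur
--
--         if direction == 0:
--             if cur > L:
--                 swirly = False
--             L = cur
--
--     return swirly
-- ===== SOURCE B (Python) =====
-- def _pick(word, parity):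
--     # characters of word sitting at indices of the given parity, in order
--     return [c for i, c in enumerate(word) if i % 2 == parity]
--
-- def _nondecreasing(seq):
--     return all(a <= b for a, b in zip(seq, seq[1:]))
--
-- def _nonincreasing(seq):
--     return all(b <= a for a, b in zip(seq, seq[1:]))
--
-- def swirlout_counterwise(word):
--     # Staged decomposition: the alternating-extremes test splits into two
--     # independent monotonicity checks on the two parity subsequences.
--     first = word[0]
--     ups = _pick(word, 0)             # word[0], word[2], ... must be non-decreasing
--     downs = [first] + _pick(word, 1)   # word[0], word[1], word[3], ... must be non-increasing
--     return _nondecreasing(ups) and _nonincreasing(downs)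
-- ===== Notes on version B (the rewrite author's own statement) =====
-- stated objective: alternative
-- what changed: Replaces A's single fused index loop with parity arithmetic and a sticky boolean by a staged decomposition: first extract the two parity subsequences (even indices; word[0] followed by odd indices), then run two independent pairwise monotonicity passes (non-decreasing / non-increasing) over them.
import Mathlib
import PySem

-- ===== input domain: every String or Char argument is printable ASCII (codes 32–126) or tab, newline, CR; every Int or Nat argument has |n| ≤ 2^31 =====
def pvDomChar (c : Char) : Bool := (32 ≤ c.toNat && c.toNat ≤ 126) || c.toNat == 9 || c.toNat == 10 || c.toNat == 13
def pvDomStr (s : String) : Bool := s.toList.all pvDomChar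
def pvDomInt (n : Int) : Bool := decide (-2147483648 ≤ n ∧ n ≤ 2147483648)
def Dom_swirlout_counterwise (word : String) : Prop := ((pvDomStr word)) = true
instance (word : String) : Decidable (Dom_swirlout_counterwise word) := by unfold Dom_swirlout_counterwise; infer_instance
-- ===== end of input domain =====

-- B replaces A's fused index loop (parity arithmetic + sticky boolean) by a staged
-- decomposition: extract the two parity subsequences, then run two independent
-- pairwise monotonicity passes over them (alternative, same cost).

-- ===== PORT A =====
-- Literal port of A: fold over range(1, len(word)) carrying (swirly, L, R);
-- word[0] on the empty string raises IndexError (excluded by Pre_), here defaulted.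
def swirlout_counterwise (word : String) : Bool :=
  let cs := word.toList
  let L0 := (PySem.List.pyGet? cs 0).getD ' '
  let st := (PySem.List.pyRange 1 (PySem.List.len cs) 1).foldl
    (fun (st : Bool × Char × Char) i =>
      let direction := PySem.Int.mod (i + 1) 2
      let cur := PySem.List.pyGetD cs i ' '
      let st1 : Bool × Char × Char :=
        if direction = 1 then
          ((if cur < st.2.2 then false else st.1), st.2.1, cur)
        else st
      let st2 : Bool × Char × Char :=
        if direction = 0 then
          ((if cur > st1.2.1 then false else st1.1), cur, st1.2.2)
        else st1
      st2)
    (true, L0, L0)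
  st.1

-- ===== PORT B =====
-- _pick(word, parity): the comprehension over enumerate(word) keeping indices of
-- the given parity.
def pvPick (cs : List Char) (parity : Int) : List Char :=
  ((PySem.List.enumerate cs 0).filter (fun p => PySem.Int.mod p.1 2 == parity)).map (·.2)

-- all(a <= b for a, b in zip(seq, seq[1:]))
def pvNonDecr (s : List Char) : Bool := (s.zip s.tail).all (fun p => p.1 ≤ p.2)
-- all(b <= a for a, b in zip(seq, seq[1:]))
def pvNonIncr (s : List Char) : Bool := (s.zip s.tail).all (fun p => p.2 ≤ p.1)

def swirlout_counterwise_alt (word : String) : Bool :=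
  match word.toList with
  | [] => false   -- word[0] raises IndexError; excluded by Pre_
  | c :: rest =>
      let ups := pvPick (c :: rest) 0
      let downs := c :: pvPick (c :: rest) 1
      pvNonDecr ups && pvNonIncr downs

-- ===== PRECONDITION & SPEC =====
-- word[0] raises IndexError on the empty string in both A and B.
def Pre_swirlout_counterwise (word : String) : Prop := word ≠ ""
instance (word : String) : Decidable (Pre_swirlout_counterwise word) := by unfold Pre_swirlout_counterwise; infer_instance
def pvWitness_swirlout_counterwise : String := "cabd"

def Spec_swirlout_counterwise (word : String) (out : Bool) : Prop := out = swirlout_counterwise_alt word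
instance (word : String) (out : Bool) : Decidable (Spec_swirlout_counterwise word out) := by unfold Spec_swirlout_counterwise; infer_instance

-- ===== CLAIM (what is proved, stated in full; the proofs are below) =====
def Claim_equal_swirlout_counterwise : Prop := ∀ (word : String), Dom_swirlout_counterwise word → Pre_swirlout_counterwise word → Spec_swirlout_counterwise word (swirlout_counterwise word)

-- ===== LEMMAS AND PROOFS =====

-- Proof-side characterisation of A's loop: the tail is checked two letters
-- at a time against the last pair of extremes.
def pvChainOk (lo hi : Char) : List Char → Bool
  | [] => true
  | [d] => if d > lo then false else true
  | d :: u :: rest =>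
      if d > lo then false
      else if u < hi then false
      else pvChainOk d u rest

-- A's loop body, after the index/element pair has been made explicit.
def pvABody (st : Bool × Char × Char) (p : Int × Char) : Bool × Char × Char :=
  let direction := PySem.Int.mod (p.1 + 1) 2
  let cur := p.2
  let st1 : Bool × Char × Char :=
    if direction = 1 then ((if cur < st.2.2 then false else st.1), st.2.1, cur)
    else st
  let st2 : Bool × Char × Char :=
    if direction = 0 then ((if cur > st1.2.1 then false else st1.1), cur, st1.2.2)
    else st1
  st2

theorem pvABody_fold_eq : ∀ (rest : List Char) (k : Int), k % 2 = 1 →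
    ∀ (s : Bool) (L R : Char),
    ((PySem.List.enumerate rest k).foldl pvABody (s, L, R)).1 = (s && pvChainOk L R rest)
  | [], k, hk, s, L, R => by
      simp [PySem.List.enumerate_nil, pvChainOk]
  | [d], k, hk, s, L, R => by
      have h1 : PySem.Int.mod (k + 1) 2 = 0 := by
        simp [pysem]; omega
      simp only [PySem.List.enumerate_cons, PySem.List.enumerate_nil, List.foldl_cons,
        List.foldl_nil, pvABody, pvChainOk, h1]
      by_cases hd : d > L <;> simp [hd]
  | d :: u :: rest, k, hk, s, L, R => by
      have h1 : PySem.Int.mod (k + 1) 2 = 0 := by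
        simp [pysem]; omega
      have h2 : PySem.Int.mod (k + 1 + 1) 2 = 1 := by
        simp [pysem]; omega
      have hk2 : (k + 1 + 1) % 2 = 1 := by omega
      simp only [PySem.List.enumerate_cons, List.foldl_cons]
      rw [pvABody_fold_eq rest (k + 1 + 1) hk2]
      simp only [pvABody, h1, h2]
      by_cases hd : d > L <;> by_cases hu : u < R <;>
        simp [hd, hu, pvChainOk]

-- Proof-side recursive view of the parity subsequences.
def pvEveryOther : List Char → List Char
  | [] => []
  | [c] => [c]
  | c :: _ :: rest => c :: pvEveryOther rest

theorem pvEveryOther_cons (x : Char) (xs : List Char) :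
    pvEveryOther (x :: xs) = x :: pvEveryOther xs.tail := by
  cases xs <;> rfl

theorem pvPick_eq : ∀ (cs : List Char) (k : Int), k % 2 = 0 →
    (((PySem.List.enumerate cs k).filter (fun p => PySem.Int.mod p.1 2 == 0)).map (·.2)
        = pvEveryOther cs)
    ∧ (((PySem.List.enumerate cs k).filter (fun p => PySem.Int.mod p.1 2 == 1)).map (·.2)
        = pvEveryOther cs.tail)
  | [], k, hk => by simp [PySem.List.enumerate_nil, pvEveryOther]
  | [c], k, hk => by
      have h0 : PySem.Int.mod k 2 = 0 := by simp [pysem]; omega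
      refine ⟨?_, ?_⟩ <;>
        simp only [PySem.List.enumerate_cons, PySem.List.enumerate_nil, List.filter_cons,
          List.filter_nil, h0, show ((0 : Int) == 0) = true from rfl,
          show ((0 : Int) == 1) = false from rfl, if_true, List.map_cons, List.map_nil, List.tail_cons] <;> rfl
  | c :: d :: cs, k, hk => by
      have h0 : PySem.Int.mod k 2 = 0 := by simp [pysem]; omega
      have h1 : PySem.Int.mod (k + 1) 2 = 1 := by simp [pysem]; omega
      have hk2 : (k + 1 + 1) % 2 = 0 := by omega
      obtain ⟨ih0, ih1⟩ := pvPick_eq cs (k + 1 + 1) hk2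
      refine ⟨?_, ?_⟩ <;>
        simp only [PySem.List.enumerate_cons, List.filter_cons, h0, h1,
          show ((0 : Int) == 0) = true from rfl, show ((0 : Int) == 1) = false from rfl,
          show ((1 : Int) == 0) = false from rfl, show ((1 : Int) == 1) = true from rfl,
          if_true, if_false, Bool.false_eq_true, List.map_cons,
          List.tail_cons]
      · rw [ih0]; rfl
      · rw [ih1, pvEveryOther_cons d cs]

theorem pvNonDecr_cons₂ (a b : Char) (s : List Char) :
    pvNonDecr (a :: b :: s) = (decide (a ≤ b) && pvNonDecr (b :: s)) := by
  simp [pvNonDecr]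

theorem pvNonIncr_cons₂ (a b : Char) (s : List Char) :
    pvNonIncr (a :: b :: s) = (decide (b ≤ a) && pvNonIncr (b :: s)) := by
  simp [pvNonIncr]

theorem pvChainOk_eq : ∀ (rest : List Char) (lo hi : Char),
    pvChainOk lo hi rest
      = (pvNonDecr (hi :: pvEveryOther rest.tail) && pvNonIncr (lo :: pvEveryOther rest))
  | [], lo, hi => by simp [pvChainOk, pvEveryOther, pvNonDecr, pvNonIncr]
  | [d], lo, hi => by
      simp only [pvChainOk, pvEveryOther, List.tail_cons]
      by_cases hd : d > lo
      · simp [hd, pvNonDecr, pvNonIncr, not_le.mpr hd]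
      · simp [hd, pvNonDecr, pvNonIncr, not_lt.mp hd]
  | d :: u :: rest, lo, hi => by
      simp only [pvChainOk, List.tail_cons]
      rw [pvEveryOther_cons u rest, pvEveryOther_cons d (u :: rest)]
      simp only [List.tail_cons]
      rw [pvNonDecr_cons₂, pvNonIncr_cons₂, pvChainOk_eq rest d u]
      by_cases hd : d > lo <;> by_cases hu : u < hi
      · simp [hd, not_le.mpr hd]
      · simp [hd, not_le.mpr hd]
      · simp [hd, hu, not_le.mpr hu]
      · simp [hd, hu, not_lt.mp hd, not_lt.mp hu]

-- ===== VERDICT (by name: the statement is the Claim_ definition above) =====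
theorem swirlout_counterwise_spec : Claim_equal_swirlout_counterwise := by
  intro word _ hpre
  have hne : word.toList ≠ [] := by
    intro h
    exact hpre (by
      have := congrArg String.ofList h
      simpa using this)
  unfold Spec_swirlout_counterwise
  obtain ⟨c, rest, hcs⟩ : ∃ c rest, word.toList = c :: rest := by
    cases h : word.toList with
    | nil => exact absurd h hne
    | cons c rest => exact ⟨c, rest, rfl⟩
  unfold swirlout_counterwise swirlout_counterwise_alt
  rw [hcs]
  simp only [PySem.List.pyGet?_zero_cons, Option.getD_some]
  have hmap : (PySem.List.pyRange 1 (PySem.List.len (c :: rest)) 1).map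
      (fun j => (j, PySem.List.pyGetD (c :: rest) j ' ')) = PySem.List.enumerate rest 1 := by
    have h0 : PySem.List.pyRange 0 (PySem.List.len (c :: rest)) 1 =
        0 :: PySem.List.pyRange 1 (PySem.List.len (c :: rest)) 1 := by
      apply PySem.List.pyRange_one_cons
      simp [PySem.List.len]
    have henum := PySem.List.enumerate_eq_map_pyRange (xs := c :: rest) (d := ' ')
    rw [h0] at henum
    simp only [List.map_cons, PySem.List.enumerate_cons] at henum
    exact (List.cons.injEq _ _ _ _ ▸ henum).2.symm
  have hfold : (PySem.List.pyRange 1 (PySem.List.len (c :: rest)) 1).foldl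
      (fun (st : Bool × Char × Char) i => pvABody st (i, PySem.List.pyGetD (c :: rest) i ' '))
      (true, c, c)
      = (PySem.List.enumerate rest 1).foldl pvABody (true, c, c) := by
    rw [← hmap, List.foldl_map]
  have hbody : ((PySem.List.pyRange 1 (PySem.List.len (c :: rest)) 1).foldl
      (fun (st : Bool × Char × Char) i =>
        let direction := PySem.Int.mod (i + 1) 2
        let cur := PySem.List.pyGetD (c :: rest) i ' '
        let st1 : Bool × Char × Char :=
          if direction = 1 then ((if cur < st.2.2 then false else st.1), st.2.1, cur)
          else st
        let st2 : Bool × Char × Char :=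
          if direction = 0 then ((if cur > st1.2.1 then false else st1.1), cur, st1.2.2)
          else st1
        st2)
      (true, c, c)).1
      = ((PySem.List.enumerate rest 1).foldl pvABody (true, c, c)).1 := by
    rw [← hfold]; rfl
  rw [hbody, pvABody_fold_eq rest 1 (by decide) true c c, pvChainOk_eq]
  obtain ⟨h0, h1⟩ := pvPick_eq (c :: rest) 0 (by decide)
  unfold pvPick
  rw [h0, h1]
  simp only [List.tail_cons, pvEveryOther_cons c rest]
  simp [Bool.and_comm]
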